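-- pv_equiv track=rewrite | github.com/RWTH-EBC/AgentLib-FlexQuant | SimpleTesthall/local/utils/select_radiator.py | format_radiator_record
-- ===== SOURCE A (Python) =====
-- def format_radiator_record(record,radiator_name):
--     record_lines = []
--
--     record_lines.append("within Test_proj.Test_zone.Test_building_DataBase;")
--     record_lines.append(f"record {radiator_name}")
--     record_lines.append('  "-"')
--     record_lines.append("  extends AixLib.DataBase.Radiators.RadiatorBaseDataDefinition(")
--
--     for key, value in list(record.items())[:-1]:  # Add all but the last item
--         record_lines.append(f"      {key}={value},")
--
--     # Add the last key-value pair with the closing )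
--     last_key = list(record.items())[-1][0]
--     last_value = list(record.items())[-1][1]
--     record_lines.append(f"      {last_key}={last_value})")  # Last item ends with ')'
--
--     record_lines.append("  annotation ();")
--     record_lines.append(f"end {radiator_name};")
--
--     return "\n".join(record_lines)
-- ===== SOURCE B (Python) =====
-- def format_radiator_record(record, radiator_name):
--     # Build the text back-to-front: start from the footer and prepend entry lines
--     # while iterating the record in reverse; the first entry prepended (the last
--     # of the record) closes with ')', every later one uses ','.
--     out = f"  annotation ();\nend {radiator_name};"
--     closer = ")"
--     for key, value in reversed(list(record.items())):
--         out = f"      {key}={value}{closer}\n" + out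
--         closer = ","
--     return (
--         "within Test_proj.Test_zone.Test_building_DataBase;\n"
--         f"record {radiator_name}\n"
--         '  "-"\n'
--         "  extends AixLib.DataBase.Radiators.RadiatorBaseDataDefinition(\n"
--         + out
--     )
-- ===== Notes on version B (the rewrite author's own statement) =====
-- stated objective: alternative
-- what changed: Replaces A's forward line-list building (header appends, a loop over the all-but-last slice, separate last-item indexing, then '\n'.join) by a back-to-front construction: iterate the record in reverse, prepending each entry line directly onto the accumulated footer string with a closer-state variable (')' for the first prepended entry, ',' afterwards), then prepend the fixed header.
import Mathlib
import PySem

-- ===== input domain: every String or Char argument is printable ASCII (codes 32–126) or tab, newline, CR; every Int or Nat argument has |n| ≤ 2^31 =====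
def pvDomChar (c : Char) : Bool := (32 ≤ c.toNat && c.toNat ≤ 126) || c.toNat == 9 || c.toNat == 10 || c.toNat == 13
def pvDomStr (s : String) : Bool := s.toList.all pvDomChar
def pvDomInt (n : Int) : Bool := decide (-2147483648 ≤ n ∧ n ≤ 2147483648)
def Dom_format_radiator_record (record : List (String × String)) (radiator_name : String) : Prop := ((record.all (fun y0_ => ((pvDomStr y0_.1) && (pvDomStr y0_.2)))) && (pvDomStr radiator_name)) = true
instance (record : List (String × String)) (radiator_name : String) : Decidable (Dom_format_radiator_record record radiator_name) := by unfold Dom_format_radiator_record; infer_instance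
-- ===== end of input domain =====

-- B builds the text back-to-front: it iterates the record in reverse, prepending entry
-- lines onto the footer with a closer-state (')' first, ',' after), instead of A's
-- forward line-list append with an all-but-last slice plus last-item indexing and a join
-- (objective: alternative). A raises IndexError on an empty record (excluded by Pre_).


-- ===== PORT A =====
def format_radiator_record (record : List (String × String)) (radiator_name : String) : String :=
  let lines0 : List String :=
    ["within Test_proj.Test_zone.Test_building_DataBase;",
     "record " ++ radiator_name,
     "  \"-\"",
     "  extends AixLib.DataBase.Radiators.RadiatorBaseDataDefinition("]
  -- for key, value in list(record.items())[:-1]: record_lines.append(f"      {key}={value},")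
  let lines1 := (PySem.List.slice record none (some (-1))).foldl
      (fun acc kv => acc ++ ["      " ++ kv.1 ++ "=" ++ kv.2 ++ ","]) lines0
  -- last_key / last_value = list(record.items())[-1][0] / [1]  (IndexError on empty record)
  match PySem.List.pyGet? record (-1) with
  | none => ""   -- unreachable under Pre_ (empty record: Python raises IndexError)
  | some last =>
    let lines2 := lines1 ++ ["      " ++ last.1 ++ "=" ++ last.2 ++ ")"]
    let lines3 := lines2 ++ ["  annotation ();", "end " ++ radiator_name ++ ";"]
    PySem.Str.join "\n" lines3

-- ===== PORT B =====
-- back-to-front: fold over the reversed record, prepending each entry line onto the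
-- accumulated suffix; the closer-state is ")" for the first prepended entry, "," after.
def format_radiator_record_alt (record : List (String × String)) (radiator_name : String) : String :=
  let out0 : String := "  annotation ();\nend " ++ radiator_name ++ ";"
  let st := record.reverse.foldl
      (fun (st : String × String) kv =>
        ("      " ++ kv.1 ++ "=" ++ kv.2 ++ st.2 ++ "\n" ++ st.1, ","))
      (out0, ")")
  "within Test_proj.Test_zone.Test_building_DataBase;\nrecord " ++ radiator_name ++
    "\n  \"-\"\n  extends AixLib.DataBase.Radiators.RadiatorBaseDataDefinition(\n" ++ st.1

-- ===== PRECONDITION & SPEC =====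
-- Pre_ excludes only the empty record, on which A raises IndexError (items[-1]).
def Pre_format_radiator_record (record : List (String × String)) (radiator_name : String) : Prop := record ≠ []
instance (record : List (String × String)) (radiator_name : String) : Decidable (Pre_format_radiator_record record radiator_name) := by unfold Pre_format_radiator_record; infer_instance
def pvWitness_format_radiator_record : (List (String × String)) × String := ([("Type", "1")], "Rad")

def Spec_format_radiator_record (record : List (String × String)) (radiator_name : String) (out : String) : Prop := out = format_radiator_record_alt record radiator_name
instance (record : List (String × String)) (radiator_name : String) (out : String) : Decidable (Spec_format_radiator_record record radiator_name out) := by unfold Spec_format_radiator_record; infer_instance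

-- ===== CLAIM (what is proved, stated in full; the proofs are below) =====
def Claim_equal_format_radiator_record : Prop := ∀ (record : List (String × String)) (radiator_name : String), Dom_format_radiator_record record radiator_name → Pre_format_radiator_record record radiator_name → Spec_format_radiator_record record radiator_name (format_radiator_record record radiator_name)

-- ===== LEMMAS AND PROOFS =====

-- peel one line off a join whose tail is nonempty but not literally a cons
theorem pv_join_cons (sep x : List Char) (T : List (List Char)) (h : T ≠ []) :
    PySem.Chars.join sep (x :: T) = x ++ sep ++ PySem.Chars.join sep T := by
  cases T with
  | nil => exact absurd rfl h
  | cons y ys => simp [PySem.Chars.join_cons_cons]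

-- B's fold over the reversed record, characterised: for record = init ++ [last] the
-- resulting string is the entry block (init lines with ",", last with ")") ++ out0.
theorem pv_fold_char (init : List (String × String)) (last : String × String) (out0 : String) :
    ((init ++ [last]).reverse.foldl
        (fun (st : String × String) kv =>
          ("      " ++ kv.1 ++ "=" ++ kv.2 ++ st.2 ++ "\n" ++ st.1, ","))
        (out0, ")")) =
      (init.foldr (fun kv acc => "      " ++ kv.1 ++ "=" ++ kv.2 ++ ",\n" ++ acc)
        ("      " ++ last.1 ++ "=" ++ last.2 ++ ")\n" ++ out0), ",") := by
  rw [List.foldl_reverse]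
  induction init with
  | nil => simp only [List.nil_append, List.foldr_cons, List.foldr_nil]
           simp only [String.append_assoc]; rfl
  | cons x xs ih => simp only [List.cons_append, List.foldr_cons, ih]
                    simp only [String.append_assoc]; rfl

-- pulling a common suffix out of the entry-block foldr
theorem pv_foldr_append (init : List (String × String)) (b c : String) :
    init.foldr (fun kv acc => "      " ++ kv.1 ++ "=" ++ kv.2 ++ ",\n" ++ acc) (b ++ c) =
      init.foldr (fun kv acc => "      " ++ kv.1 ++ "=" ++ kv.2 ++ ",\n" ++ acc) b ++ c := by
  induction init with
  | nil => rfl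
  | cons x xs ih => simp only [List.foldr_cons, ih]; simp [String.append_assoc]

-- joining A's entry lines and the two footer lines with "\n" equals B's entry block
-- followed by the footer (all on Chars)
theorem pv_join_block (init : List (String × String)) (last : String × String)
    (a0 a1 : List Char) :
    PySem.Chars.join ['\n']
      ((init.map (fun kv : String × String =>
          "      ".toList ++ kv.1.toList ++ "=".toList ++ kv.2.toList ++ [','])) ++
        [("      ".toList ++ last.1.toList ++ "=".toList ++ last.2.toList ++ [')']), a0, a1]) =
      (init.foldr (fun kv acc => "      " ++ kv.1 ++ "=" ++ kv.2 ++ ",\n" ++ acc)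
          ("      " ++ last.1 ++ "=" ++ last.2 ++ ")\n")).toList ++ a0 ++ ['\n'] ++ a1 := by
  induction init with
  | nil =>
    simp [PySem.Chars.join_cons_cons, PySem.Chars.join_singleton, String.toList_append]
  | cons x xs ih =>
    simp only [List.map_cons, List.cons_append, List.foldr_cons]
    rw [pv_join_cons _ _ _ (by simp), ih]
    simp [String.toList_append]

theorem format_radiator_record_spec : Claim_equal_format_radiator_record := by
  intro record radiator_name _hdom hpre
  unfold Spec_format_radiator_record format_radiator_record format_radiator_record_alt
  have hrec : record = record.dropLast ++ [record.getLast hpre] :=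
    (List.dropLast_append_getLast hpre).symm
  rw [hrec]
  rw [PySem.List.slice_to_neg_one, PySem.List.pyGet?_neg_one_append_singleton]
  simp only [List.dropLast_concat, PySem.List.foldl_append_singleton_eq_map]
  rw [pv_fold_char, pv_foldr_append]
  set init := record.dropLast
  set last := record.getLast hpre
  apply String.toList_inj.mp
  simp only [PySem.Str.toList_join, List.map_append, List.map_cons, List.map_map,
    Function.comp_def, List.map_nil, String.toList_append, List.cons_append, List.nil_append,
    List.append_assoc]
  have hB := pv_join_block init last "  annotation ();".toList
      ("end ".toList ++ radiator_name.toList ++ ";".toList)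
  simp only [show ("\n".toList : List Char) = ['\n'] from rfl,
    show (",".toList : List Char) = [','] from rfl,
    show (")".toList : List Char) = [')'] from rfl, List.append_assoc] at hB ⊢
  rw [pv_join_cons _ _ _ (by simp), pv_join_cons _ _ _ (by simp),
    pv_join_cons _ _ _ (by simp), pv_join_cons _ _ _ (by simp)]
  rw [hB]
  simp
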